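-- pv_equiv track=rewrite | github.com/AidanKelley/studlife-scraper | opinions.py | process_article_basic
-- ===== SOURCE A (Python) =====
-- def get_context(words, index):
--     first_index = index
--     last_index = index
--
--     while first_index >= 0 and not is_sentence_end(words[first_index]):
--         first_index -= 1
--
--     while last_index < len(words) - 1 and not is_sentence_end(words[last_index]):
--         last_index += 1
--
--
--     return " ".join(words[first_index + 1: last_index + 1])
--
-- def is_integer(x):
--     try:
--         int(x)
--         return True
--     except:
--         return False
--
-- def is_sentence_end(word):
--     if len(word) == 0:
--         return False
--
--
--     # three cases
--     # Case 1 is ending in ! or ?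
--     # Case 2 is ending in . and being lower case and not an integer
--     # Case 3 is being a quote that ends a sentence
--     # If 1 is satisfied, it is the end of a sentence
--     is_end = len(word) > 0 and word[-1] in ["!", "?"] \
--         or (word[-1] == "." and word.lower() == word and not is_integer(word[0:-1])) \
--         or (word[-1] in ["\"", "'"] and is_sentence_end(word[0:-1]))
--
--     return is_end
--
-- def split_article(article):
--     # replace newlines in the article with spaces
--     article = article.replace("\n", " ")
--
--     words = article.split(" ")
--
--     return words
--
-- def process_word(word):
--     newWord = ""
--
--     for char in word:
--         if 'a' <= char <= 'z' or 'A' <= char <= 'Z':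
--             newWord += char
--
--     return newWord
--
-- def process_article_basic(article, matcher):
--
--     words = split_article(article)
--
--     count = 0
--     context = []
--
--     for index, word in enumerate(words):
--
--         if process_word(word.lower()) in matcher:
--             context.append(get_context(words, index))
--             count += 1
--
--     return count, context;
-- ===== SOURCE B (Python) =====
-- def is_integer(x):
--     try:
--         int(x)
--         return True
--     except:
--         return False
--
-- def is_sentence_end(word):
--     if len(word) == 0:
--         return False
--     is_end = len(word) > 0 and word[-1] in ["!", "?"] \
--         or (word[-1] == "." and word.lower() == word and not is_integer(word[0:-1])) \
--         or (word[-1] in ["\"", "'"] and is_sentence_end(word[0:-1]))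
--     return is_end
--
-- def split_article(article):
--     article = article.replace("\n", " ")
--     return article.split(" ")
--
-- def process_word(word):
--     newWord = ""
--     for char in word:
--         if 'a' <= char <= 'z' or 'A' <= char <= 'Z':
--             newWord += char
--     return newWord
--
-- def process_article_basic(article, matcher):
--     words = split_article(article)
--     n = len(words)
--     ends = [is_sentence_end(w) for w in words]
--
--     # single pass precomputing, for every index, the nearest sentence boundary
--     # on each side, so each match gets its context in O(1) boundary lookups
--     prev = []
--     last = -1
--     for i in range(n):
--         if ends[i]:
--             last = i
--         prev.append(last)
--
--     nxt = []
--     nx = n - 1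
--     for i in range(n - 1, -1, -1):
--         if ends[i]:
--             nx = i
--         nxt.append(nx)
--     nxt.reverse()
--
--     count = 0
--     context = []
--     for i, w in enumerate(words):
--         if process_word(w.lower()) in matcher:
--             context.append(" ".join(words[prev[i] + 1: nxt[i] + 1]))
--             count += 1
--     return count, context
-- ===== Notes on version B (the rewrite author's own statement) =====
-- stated objective: alternative
-- what changed: Instead of rescanning the word list outward from every matched index for its sentence boundaries, B precomputes in two linear passes, for every index, the nearest sentence-end on each side and looks the context bounds up per match.
import Mathlib
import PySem

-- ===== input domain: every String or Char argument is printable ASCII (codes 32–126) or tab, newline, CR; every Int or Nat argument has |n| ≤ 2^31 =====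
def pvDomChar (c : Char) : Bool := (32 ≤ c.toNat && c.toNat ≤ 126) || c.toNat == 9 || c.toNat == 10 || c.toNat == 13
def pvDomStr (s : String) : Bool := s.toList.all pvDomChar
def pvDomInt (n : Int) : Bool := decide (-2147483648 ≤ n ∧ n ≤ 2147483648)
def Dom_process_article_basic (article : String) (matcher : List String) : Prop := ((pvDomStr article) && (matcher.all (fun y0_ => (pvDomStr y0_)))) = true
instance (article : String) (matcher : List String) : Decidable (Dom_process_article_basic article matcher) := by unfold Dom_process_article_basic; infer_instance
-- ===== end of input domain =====

-- B precomputes each index's nearest sentence boundaries in two linear passes instead of A's outward rescan per matched word (alternative algorithm; not measured faster on the generated inputs).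


-- ===== PORT A =====
-- shared helpers (identical functions in Source A and Source B): is_integer, is_sentence_end, split_article, process_word
def pa_is_integer (x : List Char) : Bool := (PySem.Int.ofChars? x).isSome

def pa_is_sentence_end (word : List Char) : Bool :=
  if word.length = 0 then false
  else
    let lastc := PySem.List.pyGetD word (-1) ' '
    ((decide (0 < word.length)) && (lastc == '!' || lastc == '?'))
    || (lastc == '.' && (PySem.Chars.lower word == word) && !(pa_is_integer (PySem.List.slice word none (some (-1)))))
    || ((lastc == '"' || lastc == '\'') && pa_is_sentence_end (PySem.List.slice word none (some (-1))))
termination_by word.length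
decreasing_by
  simp [PySem.List.slice_to_neg_one]
  omega

def pa_split_article (article : List Char) : List (List Char) :=
  PySem.Chars.splitOn (PySem.Chars.replace article ['\n'] [' ']) [' ']

def pa_process_word (word : List Char) : List Char :=
  word.foldl (fun acc c => if ('a' ≤ c ∧ c ≤ 'z') ∨ ('A' ≤ c ∧ c ≤ 'Z') then acc ++ [c] else acc) []

-- the two while loops of get_context
def pa_scan_back (words : List (List Char)) (i : Int) : Int :=
  if h : 0 ≤ i ∧ pa_is_sentence_end (PySem.List.pyGetD words i []) = false then
    pa_scan_back words (i - 1)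
  else i
termination_by (i + 1).toNat
decreasing_by omega

def pa_scan_fwd (words : List (List Char)) (i : Int) : Int :=
  if h : i < PySem.List.len words - 1 ∧ pa_is_sentence_end (PySem.List.pyGetD words i []) = false then
    pa_scan_fwd words (i + 1)
  else i
termination_by (PySem.List.len words - i).toNat
decreasing_by simp [PySem.List.len_eq] at h ⊢; omega

def pa_get_context (words : List (List Char)) (index : Int) : List Char :=
  let first_index := pa_scan_back words index
  let last_index := pa_scan_fwd words index
  PySem.Chars.join [' '] (PySem.List.slice words (some (first_index + 1)) (some (last_index + 1)))

def process_article_basic (article : String) (matcher : List String) : Int × List String :=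
  let words := pa_split_article article.toList
  (PySem.List.enumerate words).foldl (fun (st : Int × List String) p =>
     if (matcher.map String.toList).contains (pa_process_word (PySem.Chars.lower p.2)) then
       (st.1 + 1, st.2 ++ [String.ofList (pa_get_context words p.1)])
     else st) (0, [])

-- ===== PORT B =====
def process_article_basic_alt (article : String) (matcher : List String) : Int × List String :=
  let words := pa_split_article article.toList
  let n := words.length
  let ends := words.map pa_is_sentence_end
  let prev := ((List.range n).foldl (fun (st : Int × List Int) i =>
      let last := if ends.getD i false then (i : Int) else st.1
      (last, st.2 ++ [last])) (-1, [])).2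
  let nxt := (((List.range n).reverse).foldl (fun (st : Int × List Int) i =>
      let nx := if ends.getD i false then (i : Int) else st.1
      (nx, st.2 ++ [nx])) ((n : Int) - 1, [])).2.reverse
  (PySem.List.enumerate words).foldl (fun (st : Int × List String) p =>
     if (matcher.map String.toList).contains (pa_process_word (PySem.Chars.lower p.2)) then
       (st.1 + 1, st.2 ++ [String.ofList (PySem.Chars.join [' ']
          (PySem.List.slice words (some (PySem.List.pyGetD prev p.1 (-1) + 1))
                                  (some (PySem.List.pyGetD nxt p.1 ((n : Int) - 1) + 1))))])
     else st) (0, [])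

-- ===== PRECONDITION & SPEC =====
def Spec_process_article_basic (article : String) (matcher : List String) (out : Int × List String) : Prop := out = process_article_basic_alt article matcher
instance (article : String) (matcher : List String) (out : Int × List String) : Decidable (Spec_process_article_basic article matcher out) := by unfold Spec_process_article_basic; infer_instance

-- ===== CLAIM (what is proved, stated in full; the proofs are below) =====
def Claim_equal_process_article_basic : Prop := ∀ (article : String) (matcher : List String), Dom_process_article_basic article matcher → Spec_process_article_basic article matcher (process_article_basic article matcher)

-- ===== LEMMAS AND PROOFS =====

-- value of B's running `last` after the first i indices have been processed
def pvL (ends : List Bool) : Nat → Int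
  | 0 => -1
  | i+1 => if ends.getD i false then (i : Int) else pvL ends i

-- value of B's running `nx` once index i has been processed (indices are processed downward)
def pvN (ends : List Bool) (n i : Nat) : Int :=
  if h : i + 1 < n then (if ends.getD i false then (i : Int) else pvN ends n (i+1))
  else (n : Int) - 1
termination_by n - i

theorem pv_prev_foldl (ends : List Bool) (n : Nat) :
    (List.range n).foldl (fun (st : Int × List Int) i =>
      let last := if ends.getD i false then (i : Int) else st.1
      (last, st.2 ++ [last])) (-1, [])
    = (pvL ends n, (List.range n).map (fun i => pvL ends (i+1))) := by
  induction n with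
  | zero => simp [pvL]
  | succ n ih =>
    rw [List.range_succ, List.foldl_append, ih]
    simp [pvL]

theorem pv_nxt_foldl (ends : List Bool) (n : Nat) :
    ∀ m j, j + m = n →
    ((List.range' j m).reverse).foldl (fun (st : Int × List Int) i =>
      let nx := if ends.getD i false then (i : Int) else st.1
      (nx, st.2 ++ [nx])) ((n : Int) - 1, [])
    = (pvN ends n j, ((List.range' j m).reverse).map (fun i => pvN ends n i)) := by
  intro m
  induction m with
  | zero =>
    intro j hj
    have hn : ¬ (j + 1 < n) := by omega
    rw [pvN]
    simp [hn]
  | succ m ih =>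
    intro j hj
    rw [List.range'_succ, List.reverse_cons, List.foldl_append, ih (j+1) (by omega)]
    have hN : pvN ends n j = if ends.getD j false then (j : Int) else pvN ends n (j+1) := by
      by_cases h1 : j + 1 < n
      · rw [pvN]; simp [h1]
      · have hj1 : j + 1 = n := by omega
        have h2 : ¬ (j + 1 + 1 < n) := by omega
        have hv : pvN ends n (j+1) = (n : Int) - 1 := by rw [pvN]; simp [h2]
        rw [pvN]
        simp [h1, hv]
        intro _
        omega
    simp [List.foldl_cons, hN]

theorem pv_scan_back_eq (words : List (List Char)) (i : Nat) (hi : i ≤ words.length) :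
    pa_scan_back words ((i : Int) - 1) = pvL (words.map pa_is_sentence_end) i := by
  induction i with
  | zero =>
    rw [pa_scan_back]
    simp [pvL]
  | succ i ih =>
    have hlt : i < words.length := by omega
    rw [show (((i+1 : Nat) : Int) - 1) = (i : Int) by push_cast; ring]
    rw [pa_scan_back]
    have hget : PySem.List.pyGetD words (i : Int) [] = words[i] := by
      simp [PySem.List.pyGetD_natCast, List.getD_eq_getElem?_getD, hlt]
    have hsome : words[i]? = some words[i] := List.getElem?_eq_getElem hlt
    by_cases he : pa_is_sentence_end words[i] = true
    · simp [hget, he, pvL, hsome]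
    · simp only [Bool.not_eq_true] at he
      simp [hget, he, pvL, hsome, ih (by omega)]

theorem pv_scan_fwd_eq (words : List (List Char)) :
    ∀ m i, i < words.length → words.length - 1 - i = m →
    pa_scan_fwd words (i : Int) = pvN (words.map pa_is_sentence_end) words.length i := by
  intro m
  induction m with
  | zero =>
    intro i hi hm
    rw [pa_scan_fwd, pvN]
    have hnc : ¬ ((i : Int) < (words.length : Int) - 1) := by omega
    simp [hnc]
    omega
  | succ m ih =>
    intro i hi hm
    have hlt : i < words.length := hi
    have h1 : i + 1 < words.length := by omega
    rw [pa_scan_fwd, pvN]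
    have hc : (i : Int) < PySem.List.len words - 1 := by
      simp [PySem.List.len_eq]; omega
    have hget : PySem.List.pyGetD words (i : Int) [] = words[i] := by
      simp [PySem.List.pyGetD_natCast, List.getD_eq_getElem?_getD, hlt]
    have hsome : words[i]? = some words[i] := List.getElem?_eq_getElem hlt
    by_cases he : pa_is_sentence_end words[i] = true
    · simp [hget, he, hsome, h1]
    · simp only [Bool.not_eq_true] at he
      have hrec := ih (i+1) h1 (by omega)
      push_cast at hrec
      have hc' : (i : Int) < (words.length : Int) - 1 := by omega
      simp [hget, he, hsome, h1, hrec, hc']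

theorem pv_main (words : List (List Char)) (matcher : List String) :
    (PySem.List.enumerate words).foldl (fun (st : Int × List String) p =>
       if (matcher.map String.toList).contains (pa_process_word (PySem.Chars.lower p.2)) then
         (st.1 + 1, st.2 ++ [String.ofList (pa_get_context words p.1)])
       else st) (0, [])
    = (PySem.List.enumerate words).foldl (fun (st : Int × List String) p =>
       if (matcher.map String.toList).contains (pa_process_word (PySem.Chars.lower p.2)) then
         (st.1 + 1, st.2 ++ [String.ofList (PySem.Chars.join [' ']
            (PySem.List.slice words
              (some (PySem.List.pyGetD (((List.range words.length).foldl (fun (st : Int × List Int) i =>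
                  let last := if (words.map pa_is_sentence_end).getD i false then (i : Int) else st.1
                  (last, st.2 ++ [last])) (-1, [])).2) p.1 (-1) + 1))
              (some (PySem.List.pyGetD ((((List.range words.length).reverse).foldl (fun (st : Int × List Int) i =>
                  let nx := if (words.map pa_is_sentence_end).getD i false then (i : Int) else st.1
                  (nx, st.2 ++ [nx])) ((words.length : Int) - 1, [])).2.reverse) p.1 ((words.length : Int) - 1) + 1))))])
       else st) (0, []) := by
  rw [pv_prev_foldl (words.map pa_is_sentence_end) words.length]
  rw [show (List.range words.length).reverse = (List.range' 0 words.length).reverse from by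
    rw [List.range_eq_range']]
  rw [pv_nxt_foldl (words.map pa_is_sentence_end) words.length words.length 0 (by omega)]
  apply PySem.List.foldl_congr_mem
  intro acc p hp
  rw [PySem.List.mem_enumerate_iff] at hp
  obtain ⟨k, hk, rfl⟩ := hp
  simp only [zero_add]
  cases hm : (matcher.map String.toList).contains (pa_process_word (PySem.Chars.lower words[k])) with
  | false => simp only [Bool.false_eq_true, if_false]
  | true =>
    simp only [if_true]
    have hprev : PySem.List.pyGetD ((List.range words.length).map (fun i => pvL (words.map pa_is_sentence_end) (i+1))) (k : Int) (-1)
        = pvL (words.map pa_is_sentence_end) (k+1) := by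
      simp [List.getD_eq_getElem?_getD, hk]
    have hnxt : PySem.List.pyGetD (((List.range' 0 words.length).reverse.map (fun i => pvN (words.map pa_is_sentence_end) words.length i)).reverse) (k : Int) ((words.length : Int) - 1)
        = pvN (words.map pa_is_sentence_end) words.length k := by
      rw [show ((List.range' 0 words.length).reverse.map (fun i => pvN (words.map pa_is_sentence_end) words.length i)).reverse
            = (List.range' 0 words.length).map (fun i => pvN (words.map pa_is_sentence_end) words.length i) from by
          rw [← List.map_reverse, List.reverse_reverse]]
      rw [← List.range_eq_range']
      simp [List.getD_eq_getElem?_getD, hk]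
    rw [hprev, hnxt]
    unfold pa_get_context
    have hb : pa_scan_back words (k : Int) = pvL (words.map pa_is_sentence_end) (k+1) := by
      have h := pv_scan_back_eq words (k+1) (by omega)
      rw [show (((k+1 : Nat) : Int) - 1) = (k : Int) from by push_cast; ring] at h
      exact h
    have hf : pa_scan_fwd words (k : Int) = pvN (words.map pa_is_sentence_end) words.length k :=
      pv_scan_fwd_eq words (words.length - 1 - k) k hk rfl
    rw [hb, hf]

-- ===== VERDICT (by name: the statement is the Claim_ definition above) =====
theorem process_article_basic_spec : Claim_equal_process_article_basic := by
  intro article matcher _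
  show process_article_basic article matcher = process_article_basic_alt article matcher
  exact pv_main (pa_split_article article.toList) matcher
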